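-- pv_equiv track=rewrite | github.com/ttan0091/RA3 | skills_data/sampled_skills_1000/random/develata-deve-skills-my-skills-code-shorters-js-shorter-skill-md/content/scripts/js_modularizer.py | split_by_patterns
-- ===== SOURCE A (Python) =====
-- def split_by_patterns(lines):
--     sections = []
--     current = []
--     for line in lines:
--         stripped = line.lstrip()
--         if (
--             stripped.startswith("export ")
--             or stripped.startswith("function ")
--             or stripped.startswith("class ")
--         ) and current:
--             sections.append(current)
--             current = []
--         current.append(line)
--     if current:
--         sections.append(current)
--     return sections
-- ===== SOURCE B (Python) =====
-- def _is_boundary(line):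
--     s = line.lstrip()
--     return s.startswith("export ") or s.startswith("function ") or s.startswith("class ")
--
--
-- def split_by_patterns(lines):
--     # index-scan decomposition: each section is lines[i:j] where j is the next
--     # boundary index after i (a boundary never starts a section it did not open)
--     sections = []
--     i, n = 0, len(lines)
--     while i < n:
--         j = i + 1
--         while j < n and not _is_boundary(lines[j]):
--             j += 1
--         sections.append(lines[i:j])
--         i = j
--     return sections
-- ===== Notes on version B (the rewrite author's own statement) =====
-- stated objective: alternative
-- what changed: Replaces the accumulator-threaded fold (sections/current lists mutated per line) with a scan-to-next-boundary decomposition: for each section start, scan forward to the next boundary line and emit the slice, so no accumulator state is carried across lines.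
import Mathlib
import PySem

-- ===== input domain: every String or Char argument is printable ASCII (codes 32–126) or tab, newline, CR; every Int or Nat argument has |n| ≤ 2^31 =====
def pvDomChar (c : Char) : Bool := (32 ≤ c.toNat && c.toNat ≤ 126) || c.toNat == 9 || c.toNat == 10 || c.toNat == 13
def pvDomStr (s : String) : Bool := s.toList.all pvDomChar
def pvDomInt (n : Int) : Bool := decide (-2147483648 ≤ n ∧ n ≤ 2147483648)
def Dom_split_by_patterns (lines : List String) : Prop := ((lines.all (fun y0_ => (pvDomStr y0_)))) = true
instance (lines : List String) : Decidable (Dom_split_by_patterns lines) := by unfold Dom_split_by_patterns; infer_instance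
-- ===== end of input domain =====

-- B replaces A's accumulator-threaded fold with a scan-to-next-boundary slicing decomposition
-- (same values; objective: alternative structure, no speed claim).

-- ===== PORT A =====
-- one fold step: the body of A's for-loop over (sections, current)
def pvStepA (st : List (List String) × List String) (line : String) :
    List (List String) × List String :=
  let stripped := PySem.Str.lstrip line
  if (PySem.Str.startswith stripped "export " ||
      PySem.Str.startswith stripped "function " ||
      PySem.Str.startswith stripped "class ") && !st.2.isEmpty then
    (st.1 ++ [st.2], [line])
  else
    (st.1, st.2 ++ [line])

-- the trailing 'if current: sections.append(current)'
def pvFin (st : List (List String) × List String) : List (List String) :=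
  if st.2.isEmpty then st.1 else st.1 ++ [st.2]

def split_by_patterns (lines : List String) : List (List String) :=
  pvFin (lines.foldl pvStepA ([], []))

-- ===== PORT B =====
def pvIsBoundary (line : String) : Bool :=
  let s := PySem.Str.lstrip line
  PySem.Str.startswith s "export " || PySem.Str.startswith s "function " ||
    PySem.Str.startswith s "class "

-- inner while loop: split off the longest non-boundary prefix (section tail, remainder)
def pvTakeSec : List String → List String × List String
  | [] => ([], [])
  | l :: rest =>
    if pvIsBoundary l then ([], l :: rest)
    else
      let p := pvTakeSec rest
      (l :: p.1, p.2)

theorem pvTakeSec_len_le (xs : List String) : (pvTakeSec xs).2.length ≤ xs.length := by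
  induction xs with
  | nil => simp [pvTakeSec]
  | cons l rest ih =>
    simp only [pvTakeSec]
    split
    · simp
    · simpa using Nat.le_succ_of_le ih

-- outer while loop: emit one section per boundary-started run
def pvAltGo : List String → List (List String)
  | [] => []
  | l :: rest => (l :: (pvTakeSec rest).1) :: pvAltGo (pvTakeSec rest).2
termination_by xs => xs.length
decreasing_by
  exact Nat.lt_succ_of_le (pvTakeSec_len_le rest)

def split_by_patterns_alt (lines : List String) : List (List String) :=
  pvAltGo lines

-- ===== PRECONDITION & SPEC =====
def Spec_split_by_patterns (lines : List String) (out : List (List String)) : Prop := out = split_by_patterns_alt lines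
instance (lines : List String) (out : List (List String)) : Decidable (Spec_split_by_patterns lines out) := by unfold Spec_split_by_patterns; infer_instance

-- ===== CLAIM (what is proved, stated in full; the proofs are below) =====
def Claim_equal_split_by_patterns : Prop := ∀ (lines : List String), Dom_split_by_patterns lines → Spec_split_by_patterns lines (split_by_patterns lines)

-- ===== LEMMAS AND PROOFS =====

theorem pvStepA_eq (st : List (List String) × List String) (line : String) :
    pvStepA st line =
      if pvIsBoundary line && !st.2.isEmpty then (st.1 ++ [st.2], [line])
      else (st.1, st.2 ++ [line]) := by
  simp [pvStepA, pvIsBoundary]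

-- loop invariant: running A's fold from (secs, cur) with cur ≠ [] and finalizing
-- yields secs, then cur extended to the next boundary, then B's sections of the rest
theorem pv_loop_eq (xs : List String) (secs : List (List String)) (cur : List String)
    (hc : cur ≠ []) :
    pvFin (xs.foldl pvStepA (secs, cur)) =
      secs ++ (cur ++ (pvTakeSec xs).1) :: pvAltGo (pvTakeSec xs).2 := by
  induction xs generalizing secs cur with
  | nil =>
    simp [pvFin, pvTakeSec, pvAltGo, hc]
  | cons l rest ih =>
    rw [List.foldl_cons, pvStepA_eq]
    by_cases hb : pvIsBoundary l
    · rw [if_pos (by simp [hb, hc])]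
      rw [ih _ [l] (by simp)]
      simp [pvTakeSec, hb, pvAltGo]
    · rw [if_neg (by simp [hb])]
      rw [ih _ (cur ++ [l]) (by simp)]
      simp [pvTakeSec, hb]

-- ===== VERDICT (by name: the statement is the Claim_ definition above) =====
theorem split_by_patterns_spec : Claim_equal_split_by_patterns := by
  intro lines _
  unfold Spec_split_by_patterns split_by_patterns split_by_patterns_alt
  cases lines with
  | nil => simp [pvFin, pvAltGo]
  | cons l rest =>
    rw [List.foldl_cons, pvStepA_eq]
    rw [if_neg (by simp)]
    exact (pv_loop_eq rest [] [l] (by simp)).trans (by simp [pvAltGo])
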